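-- pv_equiv track=rewrite | github.com/nvanderw/connect4 | test_board.py | parse_board
-- ===== SOURCE A (Python) =====
-- def parse_board(input: list[str]) -> int:
--     result = 0
--
--     for col in input:
--         for bit in col:
--             if bit != "0" and bit != "1":
--                 raise Exception(f"Unexpected input: {bit}")
--
--             result <<= 1
--             result |= int(bit)
--
--     return result
-- ===== SOURCE B (Python) =====
-- def parse_board(input: list[str]) -> int:
--     s = "".join(input)
--     for bit in s:
--         if bit != "0" and bit != "1":
--             raise Exception(f"Unexpected input: {bit}")
--     return sum(2 ** i for i, bit in enumerate(reversed(s)) if bit == "1")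
-- ===== Notes on version B (the rewrite author's own statement) =====
-- stated objective: idiomatic
-- what changed: Replaces the interleaved nested shift-and-or accumulation with a join of all columns, a separate validation pass, and a sum of powers of two over the reversed string; Pre_ excludes exactly the inputs with a non-'0'/'1' character, on which both A and B raise the same Exception.
import Mathlib
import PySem

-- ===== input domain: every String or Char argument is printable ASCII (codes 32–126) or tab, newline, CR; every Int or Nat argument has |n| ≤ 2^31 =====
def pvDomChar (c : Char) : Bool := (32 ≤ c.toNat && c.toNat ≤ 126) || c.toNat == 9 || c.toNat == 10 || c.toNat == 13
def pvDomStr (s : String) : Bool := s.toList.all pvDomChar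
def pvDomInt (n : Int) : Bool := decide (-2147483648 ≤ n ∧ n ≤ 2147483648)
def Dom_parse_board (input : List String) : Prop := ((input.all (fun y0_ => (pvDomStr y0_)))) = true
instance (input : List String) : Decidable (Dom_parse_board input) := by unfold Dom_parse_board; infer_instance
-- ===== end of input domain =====

-- B joins the columns into one string, validates it in a separate pass, and sums powers of two
-- over the reversed string instead of A's interleaved shift-and-or accumulation (objective: idiomatic).

-- ===== PORT A =====
def parse_board (input : List String) : Int :=
  input.foldl (fun result col =>
    col.toList.foldl (fun result bit =>
      if bit ≠ '0' ∧ bit ≠ '1' then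
        result  -- raise Exception(...): unreachable under Pre_parse_board
      else
        PySem.Int.bor (result <<< (1 : Nat)) (if bit = '1' then 1 else 0))  -- int(bit) for bit ∈ {'0','1'}
      result) 0

-- ===== PORT B =====
def parse_board_alt (input : List String) : Int :=
  let s := PySem.Str.join "" input
  if s.toList.all (fun bit => bit == '0' || bit == '1') then
    -- sum(2 ** i for i, bit in enumerate(reversed(s)) if bit == "1"); indices from enumerate are ≥ 0
    (PySem.List.enumerate s.toList.reverse).foldl
      (fun acc p => if p.2 == '1' then acc + 2 ^ p.1.toNat else acc) 0
  else
    0  -- raise Exception(...): unreachable under Pre_parse_board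

-- ===== PRECONDITION & SPEC =====
-- Pre_ excludes exactly the inputs containing a character other than '0'/'1', on which A raises Exception.
def Pre_parse_board (input : List String) : Prop :=
  (input.all fun col => col.toList.all fun bit => bit == '0' || bit == '1') = true
instance (input : List String) : Decidable (Pre_parse_board input) := by
  unfold Pre_parse_board; infer_instance
def pvWitness_parse_board : List String := (["10", "11", ""])
def Spec_parse_board (input : List String) (out : Int) : Prop := out = parse_board_alt input
instance (input : List String) (out : Int) : Decidable (Spec_parse_board input out) := by
  unfold Spec_parse_board; infer_instance

-- ===== CLAIM =====
def Claim_equal_parse_board : Prop :=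
  ∀ (input : List String), Dom_parse_board input → Pre_parse_board input →
    Spec_parse_board input (parse_board input)

-- ===== LEMMAS AND PROOFS =====

-- digit value of a validated character
def pvD (c : Char) : Nat := if c = '1' then 1 else 0

-- the intended value of a validated bit string, structurally from the front
def pvV : List Char → Nat
  | [] => 0
  | c :: cs => pvD c * 2 ^ cs.length + pvV cs

theorem pv_lor_one (n : Nat) : (2 * n) ||| 1 = 2 * n + 1 := by
  apply Nat.eq_of_testBit_eq
  intro i
  cases i with
  | zero => simp [Nat.mul_mod_right]
  | succ j =>
      have h1 : 2 * n / 2 = n := by omega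
      have h2 : (2 * n + 1) / 2 = n := by omega
      simp only [Nat.testBit_or]
      simp [Nat.testBit_succ, h1, h2]

theorem pvA_step (n : Nat) (bit : Char) (h : bit = '0' ∨ bit = '1') :
    (if bit ≠ '0' ∧ bit ≠ '1' then ((n : Int))
     else PySem.Int.bor (((n : Int)) <<< (1 : Nat)) (if bit = '1' then 1 else 0))
      = ((2 * n + pvD bit : Nat) : Int) := by
  have hsh : ((n : Int)) <<< (1 : Nat) = ((2 * n : Nat) : Int) := by
    rw [Int.shiftLeft_eq]; push_cast; ring
  rcases h with h | h
  · subst h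
    rw [if_neg (by simp), hsh]
    simp [pvD]
  · subst h
    rw [if_neg (by simp), hsh, if_pos rfl,
        show (1 : Int) = ((1 : Nat) : Int) from rfl, PySem.Int.bor_natCast, pv_lor_one]
    simp [pvD]

-- A's inner character loop, lifted to Nat
theorem pvA_chars (cs : List Char) (n : Nat)
    (h : ∀ c ∈ cs, c = '0' ∨ c = '1') :
    cs.foldl (fun result bit =>
        if bit ≠ '0' ∧ bit ≠ '1' then result
        else PySem.Int.bor (result <<< (1 : Nat)) (if bit = '1' then 1 else 0)) ((n : Int))
      = ((cs.foldl (fun m c => 2 * m + pvD c) n : Nat) : Int) := by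
  induction cs generalizing n with
  | nil => rfl
  | cons c cs ih =>
      simp only [List.foldl_cons]
      rw [pvA_step n c (h c (by simp))]
      exact ih _ (fun x hx => h x (by simp [hx]))

-- the doubling fold computes pvV with the seed shifted past the whole list
theorem pv_foldl_eq_V (cs : List Char) (n : Nat) :
    cs.foldl (fun m c => 2 * m + pvD c) n = n * 2 ^ cs.length + pvV cs := by
  induction cs generalizing n with
  | nil => simp [pvV]
  | cons c cs ih =>
      simp only [List.foldl_cons, pvV, List.length_cons, ih]
      ring

theorem pv_enumerate_append {α : Type} (xs ys : List α) (k : Int) :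
    PySem.List.enumerate (xs ++ ys) k
      = PySem.List.enumerate xs k ++ PySem.List.enumerate ys (k + xs.length) := by
  induction xs generalizing k with
  | nil => simp [PySem.List.enumerate]
  | cons x xs ih =>
      simp only [List.cons_append, PySem.List.enumerate, ih, List.length_cons]
      rw [show k + 1 + (xs.length : Int) = k + ((xs.length : Int) + 1) by ring]
      push_cast
      ring_nf

-- B's generator sum over enumerate(reversed cs) computes pvV cs
theorem pvB_sum (cs : List Char) :
    (PySem.List.enumerate cs.reverse).foldl
        (fun acc p => if p.2 == '1' then acc + 2 ^ p.1.toNat else acc) 0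
      = ((pvV cs : Nat) : Int) := by
  induction cs with
  | nil => rfl
  | cons c cs ih =>
      have : (c :: cs).reverse = cs.reverse ++ [c] := by simp
      rw [this, pv_enumerate_append, List.foldl_append, ih]
      simp only [PySem.List.enumerate, List.foldl_cons, List.foldl_nil, List.length_reverse]
      by_cases hc : c = '1'
      · simp [hc, pvV, pvD]
        ring
      · simp [hc, pvV, pvD]

-- flattening: (''.join input).toList is the concatenation of the columns' characters
theorem pv_join_nil_flatten (xss : List (List Char)) :
    PySem.Chars.join [] xss = xss.flatten := by
  induction xss with
  | nil => simp [PySem.Chars.join_nil]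
  | cons p rest ih =>
      cases rest with
      | nil => simp [PySem.Chars.join_singleton]
      | cons q r => rw [PySem.Chars.join_cons_cons]; simp [ih]

theorem pv_join_toList (input : List String) :
    (PySem.Str.join "" input).toList = (input.map String.toList).flatten := by
  rw [PySem.Str.toList_join]
  have h : ("" : String).toList = [] := rfl
  rw [h, pv_join_nil_flatten]

-- A's outer loop over columns equals the doubling fold over the flattened characters
theorem pvA_all (input : List String) (n : Nat)
    (h : ∀ s ∈ input, ∀ c ∈ s.toList, c = '0' ∨ c = '1') :
    input.foldl (fun result col =>
        col.toList.foldl (fun result bit =>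
          if bit ≠ '0' ∧ bit ≠ '1' then result
          else PySem.Int.bor (result <<< (1 : Nat)) (if bit = '1' then 1 else 0)) result) ((n : Int))
      = ((((input.map String.toList).flatten).foldl (fun m c => 2 * m + pvD c) n : Nat) : Int) := by
  induction input generalizing n with
  | nil => rfl
  | cons s ss ih =>
      simp only [List.foldl_cons, List.map_cons, List.flatten_cons, List.foldl_append]
      rw [pvA_chars s.toList n (h s (by simp))]
      exact ih _ (fun t ht c hc => h t (by simp [ht]) c hc)

-- ===== VERDICT =====
theorem parse_board_spec : Claim_equal_parse_board := by
  intro input _ hpre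
  unfold Spec_parse_board parse_board parse_board_alt
  have hpre' : ∀ s ∈ input, ∀ c ∈ s.toList, c = '0' ∨ c = '1' := by
    intro s hs c hc
    have h2 := (List.all_eq_true.mp ((List.all_eq_true.mp hpre) s hs)) c hc
    simpa using h2
  have hflat : ∀ c ∈ (input.map String.toList).flatten, c = '0' ∨ c = '1' := by
    intro c hc
    rcases List.mem_flatten.mp hc with ⟨l, hl, hcl⟩
    rcases List.mem_map.mp hl with ⟨s, hs, rfl⟩
    exact hpre' s hs c hcl
  have hguard : (((input.map String.toList).flatten).all fun bit => bit == '0' || bit == '1') = true := by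
    rw [List.all_eq_true]
    intro c hc
    rcases hflat c hc with h | h <;> simp [h]
  simp only [pv_join_toList, hguard, if_true]
  have hA := pvA_all input 0 hpre'
  rw [Nat.cast_zero] at hA
  rw [hA, pvB_sum, pv_foldl_eq_V]
  norm_num
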